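-- pv_equiv track=rewrite | github.com/csalcedo001/goal-reducer | policy_wo_RL2.py | remove_trailing
-- ===== SOURCE A (Python) =====
-- def remove_trailing(a):
--     va = a[::-1]
--     seen = set()
--     seen.add(va[0])
--     for i, v in enumerate(va[1:]):
--         if v in seen:
--             continue
--         else:
--             return a[:len(a)-i]
--     return [va[0]]
-- ===== SOURCE B (Python) =====
-- def remove_trailing(a):
--     last = a[-1]
--     idxs = [i for i in range(len(a)) if a[i] != last]
--     if idxs:
--         return a[:idxs[-1] + 2]
--     return a[:1]
-- ===== Notes on version B (the rewrite author's own statement) =====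
-- stated objective: simpler
-- what changed: Replaces A's reverse-copy, set-membership and backward early-exit scan with one forward pass that records mismatch positions and then takes a closed-form prefix slice two past the last mismatch.
import Mathlib
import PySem

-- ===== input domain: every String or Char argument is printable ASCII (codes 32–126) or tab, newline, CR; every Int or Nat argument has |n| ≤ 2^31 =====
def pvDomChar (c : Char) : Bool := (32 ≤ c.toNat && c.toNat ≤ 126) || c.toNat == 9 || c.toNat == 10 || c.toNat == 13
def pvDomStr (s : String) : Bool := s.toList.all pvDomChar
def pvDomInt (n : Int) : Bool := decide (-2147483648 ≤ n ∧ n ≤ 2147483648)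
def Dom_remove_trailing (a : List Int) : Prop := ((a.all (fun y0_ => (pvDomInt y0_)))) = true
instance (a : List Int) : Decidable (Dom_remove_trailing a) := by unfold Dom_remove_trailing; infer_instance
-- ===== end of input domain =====

-- B replaces A's reverse-copy + set-membership backward early-exit scan by one forward
-- pass collecting mismatch indices and a closed-form slice (objective: simpler).

-- ===== PORT A =====
-- the 'for i, v in enumerate(va[1:])' loop with its early return; exhaustion returns [va[0]]
def removeTrailingLoop (a : List Int) (seen : PySem.Set Int) (va0 : Int) :
    List (Int × Int) → List Int
  | [] => [va0]
  | (i, v) :: rest =>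
      if PySem.Set.contains seen v then removeTrailingLoop a seen va0 rest
      else PySem.List.slice a none (some ((a.length : Int) - i))

def remove_trailing (a : List Int) : List Int :=
  let va := (PySem.List.slice? a none none (-1)).getD []      -- a[::-1]
  match PySem.List.pyGet? va 0 with                            -- va[0]; none = IndexError
  | none => []                                                 -- unreachable under Pre_
  | some va0 =>
      let seen := PySem.Set.add PySem.Set.empty va0            -- seen = set(); seen.add(va[0])
      removeTrailingLoop a seen va0
        (PySem.List.enumerate (PySem.List.slice va (some 1) none) 0)

-- ===== PORT B =====
def remove_trailing_alt (a : List Int) : List Int :=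
  match PySem.List.pyGet? a (-1) with                          -- last = a[-1]; none = IndexError
  | none => []                                                 -- unreachable under Pre_
  | some last =>
      let idxs := (PySem.List.pyRange 0 a.length 1).filter
        (fun i => !(PySem.List.pyGetD a i 0 == last))          -- [i for i in range(len(a)) if a[i] != last]
      match PySem.List.pyGet? idxs (-1) with                   -- idxs[-1] when idxs nonempty
      | some j => PySem.List.slice a none (some (j + 2))       -- a[:idxs[-1] + 2]
      | none => PySem.List.slice a none (some 1)               -- a[:1]

-- ===== PRECONDITION & SPEC =====
-- Pre_ excludes only the empty list, on which A raises IndexError (indexing the last element).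
def Pre_remove_trailing (a : List Int) : Prop := a ≠ []
instance (a : List Int) : Decidable (Pre_remove_trailing a) := by
  unfold Pre_remove_trailing; infer_instance
def pvWitness_remove_trailing : List Int := [1, 2, 2]

def Spec_remove_trailing (a : List Int) (out : List Int) : Prop := out = remove_trailing_alt a
instance (a : List Int) (out : List Int) : Decidable (Spec_remove_trailing a out) := by
  unfold Spec_remove_trailing; infer_instance

-- ===== CLAIM (what is proved, stated in full; the proofs are below) =====
def Claim_equal_remove_trailing : Prop :=
  ∀ (a : List Int), Dom_remove_trailing a → Pre_remove_trailing a →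
    Spec_remove_trailing a (remove_trailing a)

-- ===== LEMMAS AND PROOFS =====

theorem loopA_char (a : List Int) (last : Int) (lst : List Int) (i : Int) :
    removeTrailingLoop a (PySem.Set.add PySem.Set.empty last) last
      (PySem.List.enumerate lst i) =
    (if (lst.dropWhile (fun v => v == last)).isEmpty then [last]
     else PySem.List.slice a none
       (some ((a.length : Int) - (i + ((lst.takeWhile (fun v => v == last)).length : Int))))) := by
  induction lst generalizing i with
  | nil => simp [PySem.List.enumerate_nil, removeTrailingLoop]
  | cons v rest ih =>
      rw [PySem.List.enumerate_cons]
      by_cases hv : v = last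
      · subst hv
        have hc : PySem.Set.contains (PySem.Set.add PySem.Set.empty v) v = true := by
          simp [PySem.Set.empty]
        simp only [removeTrailingLoop, hc, ih]
        simp [List.dropWhile, List.takeWhile]
        split
        · rfl
        · ring_nf
      · have hc : PySem.Set.contains (PySem.Set.add PySem.Set.empty last) v = false := by
          simp [PySem.Set.contains, PySem.Set.add, PySem.Set.empty]
          exact hv
        have hb : (v == last) = false := by simp [hv]
        simp only [removeTrailingLoop, hc]
        simp [List.dropWhile, List.takeWhile, hb]

theorem getLast?_filter_sorted (l : List Int) (p : Int → Bool) (j : Int)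
    (hs : l.Pairwise (· < ·)) (hj : j ∈ l) (hpj : p j = true)
    (hmax : ∀ k ∈ l, j < k → p k = false) :
    (l.filter p).getLast? = some j := by
  induction l with
  | nil => cases hj
  | cons x xs ih =>
      have hs' := (List.pairwise_cons.mp hs)
      rcases List.mem_cons.mp hj with rfl | hjxs
      · have hnil : xs.filter p = [] := by
          apply List.filter_eq_nil_iff.mpr
          intro k hk
          simp [hmax k (List.mem_cons_of_mem _ hk) (hs'.1 k hk)]
        simp [hpj, hnil]
      · have ihv := ih hs'.2 hjxs (fun k hk hlt => hmax k (List.mem_cons_of_mem _ hk) hlt)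
        have hne : xs.filter p ≠ [] := by
          intro h; rw [h] at ihv; simp at ihv
        rw [List.filter_cons]
        split
        · obtain ⟨w, ws, hw⟩ := List.exists_cons_of_ne_nil hne
          rw [hw] at ihv ⊢
          rw [List.getLast?_cons_cons]; exact ihv
        · exact ihv

theorem dropLast_rev_get (a : List Int) (m : Nat) (hm : m < a.length - 1) :
    a.dropLast.reverse[m]'(by simp [List.length_dropLast]; omega) =
      a[a.length - 2 - m]'(by omega) := by
  rw [List.getElem_reverse, List.getElem_dropLast]
  congr 1
  simp [List.length_dropLast]
  omega

-- ===== VERDICT (by name: the statement is the Claim_ definition above) =====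
theorem remove_trailing_spec : Claim_equal_remove_trailing := by
  intro a _ ha
  unfold Spec_remove_trailing remove_trailing remove_trailing_alt
  obtain ⟨last, hlast⟩ : ∃ x, a.getLast? = some x := by
    cases h : a.getLast? with
    | none => exact absurd (List.getLast?_eq_none_iff.mp h) ha
    | some x => exact ⟨x, rfl⟩
  have hn1 : 1 ≤ a.length := List.length_pos_iff.mpr ha
  have hlg : a.getLast ha = last := by
    have := List.getLast?_eq_some_getLast ha
    rw [hlast] at this; exact (Option.some_inj.mp this).symm
  have hlelem : a[a.length - 1]'(by omega) = last := by
    rw [← List.getLast_eq_getElem]; exact hlg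
  rw [PySem.List.slice?_none_none_neg_one]
  simp only [Option.getD_some]
  rw [show PySem.List.pyGet? a.reverse 0 = some last by
    rw [PySem.List.pyGet?_zero, ← List.head?_eq_getElem?, List.head?_reverse, hlast]]
  rw [show PySem.List.pyGet? a (-1) = some last by
    rw [PySem.List.pyGet?_neg_one, hlast]]
  simp only
  rw [PySem.List.slice_from_one, List.tail_reverse, loopA_char]
  rw [show PySem.List.pyGet?
        ((PySem.List.pyRange 0 (↑a.length) 1).filter
          (fun i => !(PySem.List.pyGetD a i 0 == last))) (-1) =
      ((PySem.List.pyRange 0 (↑a.length) 1).filter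
          (fun i => !(PySem.List.pyGetD a i 0 == last))).getLast? from
    PySem.List.pyGet?_neg_one _]
  set n := a.length with hn
  set L := a.dropLast.reverse with hL
  have hLlen : L.length = n - 1 := by simp [hL, List.length_dropLast]; omega
  set q : Int → Bool := fun v => v == last with hq
  cases hd : L.dropWhile q with
  | nil =>
      -- all elements of a equal last
      have hall : ∀ v ∈ a, v = last := by
        have hdl : ∀ v ∈ a.dropLast, v = last := by
          intro v hv
          have : q v = true := List.dropWhile_eq_nil_iff.mp hd v (by simp [hL, hv])
          simpa [hq] using this
        intro v hv
        rw [← List.dropLast_append_getLast ha] at hv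
        rcases List.mem_append.mp hv with h | h
        · exact hdl v h
        · rw [List.mem_singleton.mp h, hlg]
      have hfilt : (PySem.List.pyRange 0 (n:Int) 1).filter
          (fun i => !(PySem.List.pyGetD a i 0 == last)) = [] := by
        apply List.filter_eq_nil_iff.mpr
        intro k hk
        have hkb := (PySem.List.mem_pyRange_one).mp hk
        have hmem : PySem.List.pyGetD a k 0 ∈ a := by
          apply PySem.List.pyGetD_mem
          simp [PySem.Raise.InRange]
          omega
        simp [hall _ hmem]
      rw [hfilt]
      obtain ⟨x, xs, rfl⟩ := List.exists_cons_of_ne_nil ha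
      rw [PySem.List.slice_to _ (by omega : (0:Int) ≤ 1)]
      simp [hall x (by simp)]
  | cons w ws =>
      set t := (L.takeWhile q).length with ht
      have hsplit : L.takeWhile q ++ (w :: ws) = L := by
        rw [← hd]; exact List.takeWhile_append_dropWhile
      have htb : t + 1 + ws.length = n - 1 := by
        have := congrArg List.length hsplit
        simp [hLlen] at this; omega
      have hLt : t ≤ L.length := by omega
      have htw : ∀ m, m < t → a[n - 2 - m]'(by omega) = last := by
        intro m hm
        have hpre : L.takeWhile q <+: L := List.takeWhile_prefix q
        have hget : (L.takeWhile q)[m]'(by omega) = L[m]'(by omega) := hpre.getElem (i := m) (by simp [← ht]; omega)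
        have hqv : q ((L.takeWhile q)[m]'(by omega)) = true :=
          List.mem_takeWhile_imp (List.getElem_mem _)
        rw [hget] at hqv
        have hLm : L[m]'(by omega) = a[n - 2 - m]'(by omega) :=
          dropLast_rev_get a m (by omega)
        rw [hLm] at hqv
        simpa [hq] using hqv
      have hwq : q w = false := by
        have hne : L.dropWhile q ≠ [] := by rw [hd]; simp
        have h2 := List.head_dropWhile_not q hne
        have h3 : (L.dropWhile q).head hne = w := by simp [hd]
        rw [h3] at h2; exact h2
      have hmiss : a[n - 2 - t]'(by omega) = w := by
        have hLt2' : L[t]? = some w := by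
          rw [← hsplit, List.getElem?_append_right (by simp [← ht])]
          simp [← ht]
        have hLt2 : L[t]'(by omega) = w := by
          have h4 := List.getElem?_eq_getElem (l := L) (i := t) (by omega)
          rw [hLt2'] at h4; exact (Option.some_inj.mp h4).symm
        rw [← hLt2]
        exact (dropLast_rev_get a t (by omega)).symm
      have hglast : ((PySem.List.pyRange 0 (n:Int) 1).filter
          (fun i => !(PySem.List.pyGetD a i 0 == last))).getLast? =
          some ((n : Int) - 2 - t) := by
        apply getLast?_filter_sorted
        · exact PySem.List.pairwise_lt_pyRange_one 0 n
        · rw [PySem.List.mem_pyRange_one]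
          constructor
          · omega
          · omega
        · have hgw : PySem.List.pyGetD a ((n:Int) - 2 - (t:Int)) 0 = w := by
            rw [PySem.List.pyGetD_eq_getElem a 0 (i := (n:Int) - 2 - (t:Int))
              (by omega) (by omega)]
            exact (getElem_congr rfl (by omega) (by omega)).trans hmiss
          have hwl : ¬ (w = last) := by
            intro hwl; rw [hwl] at hwq; simp [hq] at hwq
          simp [hgw, hwl]
        · intro k hk hklt
          rw [PySem.List.mem_pyRange_one] at hk
          have hkget : PySem.List.pyGetD a k 0 = a[k.toNat]'(by omega) :=
            PySem.List.pyGetD_eq_getElem _ _ (by omega) (by omega)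
          by_cases hk1 : k.toNat = n - 1
          · have : a[k.toNat]'(by omega) = last :=
              (getElem_congr rfl (by omega) (by omega)).trans hlelem
            simp [hkget, this]
          · have hm : n - 2 - k.toNat < t := by omega
            have : a[k.toNat]'(by omega) = last :=
              (getElem_congr rfl (by omega) (by omega)).trans (htw (n - 2 - k.toNat) hm)
            simp [hkget, this]
      rw [hglast]
      rw [if_neg (by simp)]
      have harith : (n:Int) - (0 + (t:Int)) = ((n:Int) - 2 - (t:Int)) + 2 := by omega
      rw [harith]
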